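-- pv_equiv track=rewrite | github.com/justindobbs/Tracecore | agent_bench/runner/baseline.py | _io_audit_diff
-- ===== SOURCE A (Python) =====
-- def _normalize_io_audit(io_entries: list | None) -> list[dict]:
--     """Canonicalize io_audit entries for deterministic diffing.
--
--     - Ensure list of dicts
--     - Drop empty/unknown keys beyond type/op/path/host
--     - Sort for stable comparison
--     """
--
--     if not io_entries:
--         return []
--     normalized: list[dict] = []
--     for raw in io_entries:
--         if not isinstance(raw, dict):
--             continue
--         audit_type = raw.get("type")
--         op = raw.get("op")
--         path = raw.get("path")
--         host = raw.get("host")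
--         entry: dict[str, object] = {}
--         if isinstance(audit_type, str):
--             entry["type"] = audit_type
--         if isinstance(op, str):
--             entry["op"] = op
--         if isinstance(path, str):
--             entry["path"] = path
--         if isinstance(host, str):
--             entry["host"] = host
--         if entry:
--             normalized.append(entry)
--     normalized.sort(key=lambda e: (e.get("type", ""), e.get("op", ""), e.get("path", ""), e.get("host", "")))
--     return normalized
--
-- def _io_audit_key(entry: dict) -> tuple[str, str, str, str]:
--     return (
--         entry.get("type") or "",
--         entry.get("op") or "",
--         entry.get("path") or "",
--         entry.get("host") or "",
--     )
--
-- def _key_to_io_entry(key: tuple[str, str, str, str]) -> dict: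
--     type_, op, path, host = key
--     entry: dict[str, str] = {}
--     if type_:
--         entry["type"] = type_
--     if op:
--         entry["op"] = op
--     if path:
--         entry["path"] = path
--     if host:
--         entry["host"] = host
--     return entry
--
-- def _io_audit_diff(a: list | None, b: list | None) -> dict[str, list[dict]] | None:
--     """Compute added/removed io_audit entries between two steps."""
--
--     norm_a = _normalize_io_audit(a)
--     norm_b = _normalize_io_audit(b)
--     set_a = {_io_audit_key(item) for item in norm_a}
--     set_b = {_io_audit_key(item) for item in norm_b}
--
--     added = [_key_to_io_entry(key) for key in sorted(set_b - set_a)]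
--     removed = [_key_to_io_entry(key) for key in sorted(set_a - set_b)]
--
--     if not added and not removed:
--         return None
--     return {"added": added, "removed": removed}
-- ===== SOURCE B (Python) =====
-- # B: instead of set differences, build a sorted deduplicated key list per side
-- # and diff them with a single two-pointer merge.
-- _FIELDS = ("type", "op", "path", "host")
--
-- def _keys_of(entries):
--     ks = set()
--     for raw in entries or []:
--         if not isinstance(raw, dict):
--             continue
--         present = False
--         key = []
--         for f in _FIELDS:
--             v = raw.get(f)
--             if isinstance(v, str):
--                 present = True
--                 key.append(v)
--             else:
--                 key.append("")
--         if present: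
--             ks.add(tuple(key))
--     return sorted(ks)
--
-- def _rebuild(key):
--     return {f: v for f, v in zip(_FIELDS, key) if v}
--
-- def _io_audit_diff(a, b):
--     ka = _keys_of(a)
--     kb = _keys_of(b)
--     added, removed = [], []
--     i = j = 0
--     while i < len(ka) and j < len(kb):
--         if ka[i] == kb[j]:
--             i += 1
--             j += 1
--         elif ka[i] < kb[j]:
--             removed.append(_rebuild(ka[i]))
--             i += 1
--         else:
--             added.append(_rebuild(kb[j]))
--             j += 1
--     while i < len(ka):
--         removed.append(_rebuild(ka[i]))
--         i += 1
--     while j < len(kb):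
--         added.append(_rebuild(kb[j]))
--         j += 1
--     if not added and not removed:
--         return None
--     return {"added": added, "removed": removed}
-- ===== Notes on version B (the rewrite author's own statement) =====
-- stated objective: alternative
-- what changed: Replaces A's normalize-sort-then-set-difference pipeline with one pass per side that collects the key tuples directly into a sorted deduplicated list, then a single two-pointer merge that emits a-only keys as 'removed' and b-only keys as 'added'.
import Mathlib
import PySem

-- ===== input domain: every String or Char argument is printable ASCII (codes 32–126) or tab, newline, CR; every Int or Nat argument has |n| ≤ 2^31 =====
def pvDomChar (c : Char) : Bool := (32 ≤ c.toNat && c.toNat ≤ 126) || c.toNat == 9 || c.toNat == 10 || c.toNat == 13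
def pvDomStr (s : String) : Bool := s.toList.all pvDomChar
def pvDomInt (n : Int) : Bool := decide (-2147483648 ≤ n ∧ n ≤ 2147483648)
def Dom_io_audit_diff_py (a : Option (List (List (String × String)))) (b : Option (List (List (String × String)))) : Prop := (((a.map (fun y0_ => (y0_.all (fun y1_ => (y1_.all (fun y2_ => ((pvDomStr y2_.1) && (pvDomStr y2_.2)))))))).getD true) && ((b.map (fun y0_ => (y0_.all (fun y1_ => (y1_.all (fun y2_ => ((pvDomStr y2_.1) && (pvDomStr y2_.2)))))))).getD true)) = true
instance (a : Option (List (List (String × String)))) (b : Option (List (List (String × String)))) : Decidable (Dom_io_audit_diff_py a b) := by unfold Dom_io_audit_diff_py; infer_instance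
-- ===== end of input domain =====

-- B diffs the two sides with a single two-pointer merge of sorted deduplicated
-- key lists instead of A's set differences; same return value, similar cost.
-- Keys (Python 4-tuples of str) are modelled as List (List Char) so that the
-- lexicographic order and the sorts are kernel-computable; Python's tuple/str
-- comparison is exactly this lexicographic order on the stated ASCII domain.

-- Python's sorted() on keys (identity key); the explicit LinearOrder instances
-- denote the same lexicographic order the default instances do.
def pvSortedK (xs : List (List (List Char))) : List (List (List Char)) :=
  @PySem.List.sorted _ _ List.instLinearOrder.toLT LinearOrder.toDecidableLT xs (fun x => x) false

-- ===== PORT A =====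
-- entry = {}; entry["f"] = raw["f"] for each of the four fields present
-- (in the modelled type every element is a dict with str values, so the
-- isinstance checks of A are identically true).
def pvEntryOf (raw : List (String × String)) : PySem.Dict String String :=
  let r := PySem.Dict.mk raw
  let e : PySem.Dict String String := PySem.Dict.mk []
  let e := match r.get? "type" with | some v => e.insert "type" v | none => e
  let e := match r.get? "op" with | some v => e.insert "op" v | none => e
  let e := match r.get? "path" with | some v => e.insert "path" v | none => e
  match r.get? "host" with | some v => e.insert "host" v | none => e

-- normalize's sort key: (e.get("type",""), e.get("op",""), e.get("path",""), e.get("host",""))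
def pvSortKey (e : PySem.Dict String String) : List (List Char) :=
  [(e.getD "type" "").toList, (e.getD "op" "").toList, (e.getD "path" "").toList, (e.getD "host" "").toList]

def pvNormalize (io_entries : Option (List (List (String × String)))) : List (PySem.Dict String String) :=
  if (match io_entries with | none => true | some xs => xs.isEmpty) then []
  else
    let normalized := (io_entries.getD []).foldl
      (fun acc raw =>
        if (pvEntryOf raw).items.isEmpty then acc else acc ++ [pvEntryOf raw]) []
    @PySem.List.sorted _ _ List.instLinearOrder.toLT LinearOrder.toDecidableLT normalized pvSortKey false

-- _io_audit_key: `entry.get(f) or ""` equals getD f "" on str values ("" or "" is "")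
def pvAuditKey (e : PySem.Dict String String) : List (List Char) :=
  [(e.getD "type" "").toList, (e.getD "op" "").toList, (e.getD "path" "").toList, (e.getD "host" "").toList]

def pvKeyToEntry (k : List (List Char)) : List (String × String) :=
  match k with
  | [t, o, p, h] =>
      ((if t.isEmpty then [] else [("type", String.ofList t)]) ++
       (if o.isEmpty then [] else [("op", String.ofList o)]) ++
       (if p.isEmpty then [] else [("path", String.ofList p)]) ++
       (if h.isEmpty then [] else [("host", String.ofList h)]))
  | _ => []   -- unreachable: keys always have four components

def io_audit_diff_py (a : Option (List (List (String × String)))) (b : Option (List (List (String × String)))) : Option (List (String × List (List (String × String)))) :=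
  let norm_a := pvNormalize a
  let norm_b := pvNormalize b
  let set_a := PySem.Set.ofList (norm_a.map pvAuditKey)
  let set_b := PySem.Set.ofList (norm_b.map pvAuditKey)
  let added := (pvSortedK (PySem.Set.diff set_b set_a)).map pvKeyToEntry
  let removed := (pvSortedK (PySem.Set.diff set_a set_b)).map pvKeyToEntry
  if added.isEmpty && removed.isEmpty then none
  else some [("added", added), ("removed", removed)]

-- ===== PORT B =====
def pvFields : List String := ["type", "op", "path", "host"]

-- body of Source B's inner field loop: (present, key) accumulated over the fields
def pvKeyOf? (raw : List (String × String)) : Option (List (List Char)) :=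
  let st := pvFields.foldl
    (fun (st : Bool × List (List Char)) f =>
      match (PySem.Dict.mk raw).get? f with
      | some v => (true, st.2 ++ [v.toList])
      | none => (st.1, st.2 ++ [[]])) (false, [])
  if st.1 then some st.2 else none

def pvKeysOf (entries : Option (List (List (String × String)))) : List (List (List Char)) :=
  let ks := (entries.getD []).foldl
    (fun s raw => match pvKeyOf? raw with
      | some k => PySem.Set.add s k
      | none => s) PySem.Set.empty
  pvSortedK ks

def pvRebuild (k : List (List Char)) : List (String × String) :=
  ((pvFields.zip k).filter (fun p => !p.2.isEmpty)).map (fun p => (p.1, String.ofList p.2))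

-- Python's `ka[i] < kb[j]` (tuple comparison = this lexicographic order)
def pvLtK (x y : List (List Char)) : Bool :=
  @decide (@LT.lt _ List.instLinearOrder.toLT x y) (@LinearOrder.toDecidableLT _ List.instLinearOrder x y)

-- the two-pointer merge: returns (added keys, removed keys)
def pvMerge : List (List (List Char)) → List (List (List Char)) → List (List (List Char)) × List (List (List Char))
  | [], kb => (kb, [])
  | x :: ka, [] => ([], x :: ka)
  | x :: ka, y :: kb =>
    if x = y then pvMerge ka kb
    else if pvLtK x y then
      let r := pvMerge ka (y :: kb)
      (r.1, x :: r.2)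
    else
      let r := pvMerge (x :: ka) kb
      (y :: r.1, r.2)

def io_audit_diff_py_alt (a : Option (List (List (String × String)))) (b : Option (List (List (String × String)))) : Option (List (String × List (List (String × String)))) :=
  let ka := pvKeysOf a
  let kb := pvKeysOf b
  let r := pvMerge ka kb
  let added := r.1.map pvRebuild
  let removed := r.2.map pvRebuild
  if added.isEmpty && removed.isEmpty then none
  else some [("added", added), ("removed", removed)]

-- ===== PRECONDITION & SPEC =====
def Spec_io_audit_diff_py (a : Option (List (List (String × String)))) (b : Option (List (List (String × String)))) (out : Option (List (String × List (List (String × String))))) : Prop := out = io_audit_diff_py_alt a b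
instance (a : Option (List (List (String × String)))) (b : Option (List (List (String × String)))) (out : Option (List (String × List (List (String × String))))) : Decidable (Spec_io_audit_diff_py a b out) := by unfold Spec_io_audit_diff_py; infer_instance

-- ===== CLAIM (what is proved, stated in full; the proofs are below) =====
def Claim_equal_io_audit_diff_py : Prop := ∀ (a : Option (List (List (String × String)))) (b : Option (List (List (String × String)))), Dom_io_audit_diff_py a b → Spec_io_audit_diff_py a b (io_audit_diff_py a b)

-- ===== LEMMAS AND PROOFS =====

-- pvKeyOf? in terms of A's entry construction
theorem pvKeyOf?_spec (raw : List (String × String)) :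
    pvKeyOf? raw = if (pvEntryOf raw).items.isEmpty then none else some (pvAuditKey (pvEntryOf raw)) := by
  cases h1 : (PySem.Dict.mk raw).get? "type" <;>
  cases h2 : (PySem.Dict.mk raw).get? "op" <;>
  cases h3 : (PySem.Dict.mk raw).get? "path" <;>
  cases h4 : (PySem.Dict.mk raw).get? "host" <;>
    (simp only [pvKeyOf?, pvFields, pvEntryOf, List.foldl, h1, h2, h3, h4];
     simp [pvAuditKey, PySem.Dict.insert, PySem.Dict.getD, PySem.Dict.get?, PySem.Dict.contains])

theorem pvKeyOf?_shape (raw : List (String × String)) (k : List (List Char))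
    (h : pvKeyOf? raw = some k) : ∃ t o p q, k = [t, o, p, q] := by
  rw [pvKeyOf?_spec] at h
  split at h
  · cases h
  · exact ⟨_, _, _, _, (Option.some.inj h).symm⟩

-- A's key multiset and B's key list have the same members
theorem mem_normalize_map (a : Option (List (List (String × String)))) (k : List (List Char)) :
    k ∈ (pvNormalize a).map pvAuditKey ↔ k ∈ (a.getD []).filterMap pvKeyOf? := by
  have hkey : ∀ (raw : List (String × String)) (k : List (List Char)),
      pvKeyOf? raw = some k ↔ ((pvEntryOf raw).items.isEmpty = false ∧ pvAuditKey (pvEntryOf raw) = k) := by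
    intro raw k
    rw [pvKeyOf?_spec]
    by_cases h : (pvEntryOf raw).items.isEmpty <;> simp [h]
  have hfun : (fun (acc : List (PySem.Dict String String)) raw =>
        if (pvEntryOf raw).items.isEmpty then acc else acc ++ [pvEntryOf raw]) =
      (fun acc raw => if !(pvEntryOf raw).items.isEmpty then acc ++ [pvEntryOf raw] else acc) := by
    funext acc raw
    by_cases h : (pvEntryOf raw).items.isEmpty <;> simp [h]
  match a with
  | none => simp [pvNormalize]
  | some [] => simp [pvNormalize]
  | some (r :: rest) =>
    unfold pvNormalize
    simp only [List.isEmpty_cons, Bool.false_eq_true, if_false, Option.getD_some]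
    rw [hfun, PySem.List.foldl_append_if]
    simp only [List.nil_append, List.mem_map, PySem.List.mem_sorted, List.mem_filter,
      List.mem_filterMap, hkey]
    constructor
    · rintro ⟨e, ⟨raw, hraw, rfl⟩, hk⟩
      exact ⟨raw, hraw.1, ⟨by simpa using hraw.2, hk⟩⟩
    · rintro ⟨raw, hraw, hne, hk⟩
      exact ⟨pvEntryOf raw, ⟨raw, ⟨hraw, by simp [hne]⟩, rfl⟩, hk⟩

theorem pvKeysOf_eq_sorted (a : Option (List (List (String × String)))) :
    pvKeysOf a = pvSortedK (PySem.Set.ofList ((pvNormalize a).map pvAuditKey)) := by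
  have hstep : ∀ (l : List (List (String × String))) (s : PySem.Set (List (List Char))),
      l.foldl (fun s raw => match pvKeyOf? raw with
        | some k => PySem.Set.add s k
        | none => s) s = (l.filterMap pvKeyOf?).foldl PySem.Set.add s := by
    intro l
    induction l with
    | nil => intro s; rfl
    | cons r t ih => intro s; cases h : pvKeyOf? r <;> simp [h, ih]
  have hfold : ((a.getD []).foldl
      (fun s raw => match pvKeyOf? raw with
        | some k => PySem.Set.add s k
        | none => s) PySem.Set.empty) = PySem.Set.ofList ((a.getD []).filterMap pvKeyOf?) := by
    rw [PySem.Set.ofList_eq_foldl]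
    exact hstep _ _
  have hperm : (PySem.Set.ofList ((a.getD []).filterMap pvKeyOf?)).Perm
      (PySem.Set.ofList ((pvNormalize a).map pvAuditKey)) := by
    rw [List.perm_ext_iff_of_nodup (PySem.Set.nodup_ofList _) (PySem.Set.nodup_ofList _)]
    intro k
    rw [PySem.Set.mem_ofList, PySem.Set.mem_ofList, mem_normalize_map]
  unfold pvKeysOf pvSortedK
  rw [hfold]
  exact PySem.List.sorted_eq_sorted_of_perm _ _ _ (fun x y h => h) hperm

theorem sorted_diff (xs ys : List (List (List Char))) :
    pvSortedK (PySem.Set.diff (PySem.Set.ofList xs) (PySem.Set.ofList ys)) =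
      (pvSortedK (PySem.Set.ofList xs)).filter (fun k => !(PySem.Set.ofList ys).contains k) := by
  unfold pvSortedK
  apply PySem.List.sorted_eq_of_perm_of_pairwise_lt
  · exact List.Perm.filter _
      (@PySem.List.sorted_perm _ _ List.instLinearOrder.toLT LinearOrder.toDecidableLT
        (PySem.Set.ofList xs) (fun x => x) false)
  · exact (PySem.List.sorted_ofList_pairwise_lt xs).filter _

theorem pvMerge_spec (la lb : List (List (List Char)))
    (ha : la.Pairwise (· < ·)) (hb : lb.Pairwise (· < ·)) :
    pvMerge la lb = (lb.filter (fun y => !la.contains y), la.filter (fun x => !lb.contains x)) := by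
  fun_induction pvMerge la lb
  case case1 => simp
  case case2 => simp
  case case3 ka y kb ih =>
    obtain ⟨hya, hta⟩ := List.pairwise_cons.mp ha
    obtain ⟨hyb, htb⟩ := List.pairwise_cons.mp hb
    rw [ih hta htb]
    have h1 : List.filter (fun z => !(y :: ka).contains z) (y :: kb) =
        List.filter (fun z => !ka.contains z) kb := by
      rw [List.filter_cons_of_neg (by simp)]
      exact List.filter_congr (fun z hz => by simp [(ne_of_lt (hyb z hz)).symm])
    have h2 : List.filter (fun z => !(y :: kb).contains z) (y :: ka) =
        List.filter (fun z => !kb.contains z) ka := by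
      rw [List.filter_cons_of_neg (by simp)]
      exact List.filter_congr (fun z hz => by simp [(ne_of_lt (hya z hz)).symm])
    rw [h1, h2]
  case case4 x ka y kb hne hlt r ih =>
    obtain ⟨hxa, hta⟩ := List.pairwise_cons.mp ha
    obtain ⟨hyb, htb⟩ := List.pairwise_cons.mp hb
    have hxy : x < y := by simpa [pvLtK] using hlt
    have hxz : ∀ z ∈ y :: kb, x < z := by
      intro z hz
      rcases List.mem_cons.mp hz with rfl | hz
      · exact hxy
      · exact lt_trans hxy (hyb z hz)
    show ((pvMerge ka (y :: kb)).1, x :: (pvMerge ka (y :: kb)).2) = _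
    rw [ih hta hb]
    have h1 : List.filter (fun z => !(x :: ka).contains z) (y :: kb) =
        List.filter (fun z => !ka.contains z) (y :: kb) :=
      List.filter_congr (fun z hz => by simp [(ne_of_lt (hxz z hz)).symm])
    have hnx : x ∉ y :: kb := fun h => lt_irrefl x (hxz x h)
    have h2 : List.filter (fun z => !(y :: kb).contains z) (x :: ka) =
        x :: List.filter (fun z => !(y :: kb).contains z) ka := by
      rw [List.filter_cons_of_pos (by simp [hnx])]
    rw [h1, h2]
  case case5 x ka y kb hne hnlt r ih =>
    obtain ⟨hxa, hta⟩ := List.pairwise_cons.mp ha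
    obtain ⟨hyb, htb⟩ := List.pairwise_cons.mp hb
    have hyx : y < x := by
      have : ¬ x < y := by simpa [pvLtK] using hnlt
      exact lt_of_le_of_ne (le_of_not_gt this) (Ne.symm hne)
    have hyz : ∀ z ∈ x :: ka, y < z := by
      intro z hz
      rcases List.mem_cons.mp hz with rfl | hz
      · exact hyx
      · exact lt_trans hyx (hxa z hz)
    show (y :: (pvMerge (x :: ka) kb).1, (pvMerge (x :: ka) kb).2) = _
    rw [ih ha htb]
    have hny : y ∉ x :: ka := fun h => lt_irrefl y (hyz y h)
    have h1 : List.filter (fun z => !(x :: ka).contains z) (y :: kb) =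
        y :: List.filter (fun z => !(x :: ka).contains z) kb := by
      rw [List.filter_cons_of_pos (by simp [hny])]
    have h2 : List.filter (fun z => !(y :: kb).contains z) (x :: ka) =
        List.filter (fun z => !kb.contains z) (x :: ka) :=
      List.filter_congr (fun z hz => by simp [(ne_of_lt (hyz z hz)).symm])
    rw [h1, h2]


theorem rebuild_eq (t o p q : List Char) :
    pvRebuild [t, o, p, q] = pvKeyToEntry [t, o, p, q] := by
  by_cases ht : t.isEmpty <;> by_cases ho : o.isEmpty <;>
  by_cases hp : p.isEmpty <;> by_cases hq : q.isEmpty <;>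
    simp [pvRebuild, pvKeyToEntry, pvFields, ht, ho, hp, hq]

-- ===== VERDICT (by name: the statement is the Claim_ definition above) =====
theorem contains_sortedK (s : List (List (List Char))) (z : List (List Char)) :
    (pvSortedK s).contains z = s.contains z := by
  rw [List.contains_eq_mem, List.contains_eq_mem]
  unfold pvSortedK
  simp [@PySem.List.mem_sorted _ _ List.instLinearOrder.toLT LinearOrder.toDecidableLT]

theorem key_shape_of_mem (c : Option (List (List (String × String)))) (k : List (List Char))
    (h : k ∈ (pvNormalize c).map pvAuditKey) : ∃ t o p q, k = [t, o, p, q] := by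
  rw [mem_normalize_map] at h
  obtain ⟨raw, _, hraw⟩ := List.mem_filterMap.mp h
  exact pvKeyOf?_shape raw k hraw

theorem side_eq (c d : Option (List (List (String × String)))) :
    ((pvSortedK (PySem.Set.diff (PySem.Set.ofList ((pvNormalize d).map pvAuditKey))
        (PySem.Set.ofList ((pvNormalize c).map pvAuditKey)))).map pvKeyToEntry) =
    (((pvSortedK (PySem.Set.ofList ((pvNormalize d).map pvAuditKey))).filter
        (fun z => !(pvSortedK (PySem.Set.ofList ((pvNormalize c).map pvAuditKey))).contains z)).map pvRebuild) := by
  rw [sorted_diff]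
  have hf : List.filter (fun z => !(pvSortedK (PySem.Set.ofList ((pvNormalize c).map pvAuditKey))).contains z)
        (pvSortedK (PySem.Set.ofList ((pvNormalize d).map pvAuditKey))) =
      List.filter (fun z => !(PySem.Set.ofList ((pvNormalize c).map pvAuditKey)).contains z)
        (pvSortedK (PySem.Set.ofList ((pvNormalize d).map pvAuditKey))) :=
    List.filter_congr (fun z _ => congrArg Bool.not
      (contains_sortedK (PySem.Set.ofList ((pvNormalize c).map pvAuditKey)) z))
  rw [hf]
  apply List.map_congr_left
  intro k hk
  have hk' : k ∈ (pvNormalize d).map pvAuditKey := by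
    have := List.mem_filter.mp hk
    have h2 : k ∈ PySem.Set.ofList ((pvNormalize d).map pvAuditKey) := by
      have h3 := this.1
      unfold pvSortedK at h3
      exact (@PySem.List.mem_sorted _ _ List.instLinearOrder.toLT LinearOrder.toDecidableLT _ _ _ _).mp h3
    exact (PySem.Set.mem_ofList _ _).mp h2
  obtain ⟨t, o, p, q, rfl⟩ := key_shape_of_mem d k hk'
  exact (rebuild_eq t o p q).symm

theorem io_audit_diff_py_spec : Claim_equal_io_audit_diff_py := by
  intro a b _
  unfold Spec_io_audit_diff_py io_audit_diff_py io_audit_diff_py_alt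
  dsimp only
  rw [pvKeysOf_eq_sorted a, pvKeysOf_eq_sorted b]
  have h1 : (pvSortedK (PySem.Set.ofList ((pvNormalize a).map pvAuditKey))).Pairwise (· < ·) :=
    PySem.List.sorted_ofList_pairwise_lt _
  have h2 : (pvSortedK (PySem.Set.ofList ((pvNormalize b).map pvAuditKey))).Pairwise (· < ·) :=
    PySem.List.sorted_ofList_pairwise_lt _
  rw [pvMerge_spec _ _ h1 h2]
  rw [side_eq a b, side_eq b a]
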